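-- pv_equiv track=rewrite | github.com/MrColour/Advent_of_Code_python | 2023/day_01/p_2023_01_02.py | calibration_num
-- ===== SOURCE A (Python) =====
-- def calibration_num(string):
-- 	storage = []
--
-- 	key = 0
-- 	value = 1
--
-- 	matches = [
-- 		["1", 1],
-- 		["2", 2],
-- 		["3", 3],
-- 		["4", 4],
-- 		["5", 5],
-- 		["6", 6],
-- 		["7", 7],
-- 		["8", 8],
-- 		["9", 9],
-- 		["one", 1],
-- 		["two", 2],
-- 		["three", 3],
-- 		["four", 4],
-- 		["five", 5],
-- 		["six", 6],
-- 		["seven", 7],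
-- 		["eight", 8],
-- 		["nine", 9],
-- 	]
--
-- 	for idx in range(len(matches)):
-- 		if (string[0:len(matches[idx][key])] == matches[idx][key]):
-- 			return matches[idx][value]
-- ===== SOURCE B (Python) =====
-- _CANDS = {
-- 	'o': (("one", 1),),
-- 	't': (("two", 2), ("three", 3)),
-- 	'f': (("four", 4), ("five", 5)),
-- 	's': (("six", 6), ("seven", 7)),
-- 	'e': (("eight", 8),),
-- 	'n': (("nine", 9),),
-- }
--
-- def calibration_num(string):
-- 	if not string:
-- 		return None
-- 	c = string[0]
-- 	if c in "123456789":
-- 		return ord(c) - ord('0')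
-- 	for word, val in _CANDS.get(c, ()):
-- 		if string.startswith(word):
-- 			return val
-- 	return None
-- ===== Notes on version B (the rewrite author's own statement) =====
-- stated objective: alternative
-- what changed: Replaces A's linear scan over the 18-entry table by a dispatch on the first character: digits convert in closed form via ord(), letters index a dict keyed by first letter holding at most two word candidates, so the full-table scan disappears.
import Mathlib
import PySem

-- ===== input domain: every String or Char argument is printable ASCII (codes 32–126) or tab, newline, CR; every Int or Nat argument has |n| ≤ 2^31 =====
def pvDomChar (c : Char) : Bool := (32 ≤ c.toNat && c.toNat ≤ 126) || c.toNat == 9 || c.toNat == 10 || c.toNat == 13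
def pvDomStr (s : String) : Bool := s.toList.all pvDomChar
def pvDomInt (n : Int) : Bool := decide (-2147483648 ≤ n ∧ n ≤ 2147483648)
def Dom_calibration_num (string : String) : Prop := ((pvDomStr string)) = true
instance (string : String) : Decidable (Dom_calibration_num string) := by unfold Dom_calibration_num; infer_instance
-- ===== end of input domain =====

-- B replaces A's linear scan over the 18-entry table by a first-character dispatch:
-- closed-form ord() conversion for digits, a dict keyed by first letter for the words.


-- ===== PORT A =====
-- A's table: [["1",1],…,["nine",9]]; keys as List Char.
def pvMatchesA : List (List Char × Int) :=
  [(['1'], 1), (['2'], 2), (['3'], 3), (['4'], 4), (['5'], 5), (['6'], 6), (['7'], 7),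
   (['8'], 8), (['9'], 9),
   ("one".toList, 1), ("two".toList, 2), ("three".toList, 3), ("four".toList, 4),
   ("five".toList, 5), ("six".toList, 6), ("seven".toList, 7), ("eight".toList, 8),
   ("nine".toList, 9)]

-- A's loop with early return: string[0:len(key)] == key  (slice = List.take; exact for 0 ≤ stop).
def pvGoA : List (List Char × Int) → List Char → Option Int
  | [], _ => none
  | (k, v) :: ms, l => if l.take k.length = k then some v else pvGoA ms l

def calibration_num (string : String) : Option Int :=
  pvGoA pvMatchesA string.toList

-- ===== PORT B =====
-- B's dispatch dict _CANDS.get(c, ()): first letter → word candidates.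
def pvCands (c : Char) : List (List Char × Int) :=
  if c = 'o' then [("one".toList, 1)]
  else if c = 't' then [("two".toList, 2), ("three".toList, 3)]
  else if c = 'f' then [("four".toList, 4), ("five".toList, 5)]
  else if c = 's' then [("six".toList, 6), ("seven".toList, 7)]
  else if c = 'e' then [("eight".toList, 8)]
  else if c = 'n' then [("nine".toList, 9)]
  else []

-- B's startswith loop over the (at most two) candidates.
def pvGoB : List (List Char × Int) → List Char → Option Int
  | [], _ => none
  | (w, v) :: ws, l => if w.isPrefixOf l then some v else pvGoB ws l

def calibration_num_alt (string : String) : Option Int :=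
  match string.toList with
  | [] => none
  | c :: _ =>
      if c ∈ "123456789".toList then some ((c.toNat : Int) - 48)
      else pvGoB (pvCands c) string.toList

-- ===== PRECONDITION & SPEC =====
def Spec_calibration_num (string : String) (out : Option Int) : Prop := out = calibration_num_alt string
instance (string : String) (out : Option Int) : Decidable (Spec_calibration_num string out) := by unfold Spec_calibration_num; infer_instance

-- ===== CLAIM (what is proved, stated in full; the proofs are below) =====
def Claim_equal_calibration_num : Prop := ∀ (string : String), Dom_calibration_num string → Spec_calibration_num string (calibration_num string)

-- ===== LEMMAS AND PROOFS =====
-- take-prefix characterisation: A's slice comparison equals startswith.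
theorem pvTakeEqIffPrefix (k l : List Char) : (l.take k.length = k) ↔ (k.isPrefixOf l = true) := by
  rw [List.isPrefixOf_iff_prefix, List.prefix_iff_eq_take, eq_comm]

theorem pvGoAPrefix (ms : List (List Char × Int)) (l : List Char) : pvGoA ms l = pvGoB ms l := by
  induction ms with
  | nil => rfl
  | cons m ms ih =>
      obtain ⟨k, v⟩ := m
      simp only [pvGoA, pvGoB, pvTakeEqIffPrefix, ih]

theorem pvMain_cons (c : Char) (rest : List Char) :
    pvGoA pvMatchesA (c :: rest) =
      (if c ∈ "123456789".toList then some ((c.toNat : Int) - 48)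
       else pvGoB (pvCands c) (c :: rest)) := by
  rw [pvGoAPrefix]
  by_cases hc : c ∈ "123456789otfsen".toList
  · rw [show "123456789otfsen".toList =
        ['1','2','3','4','5','6','7','8','9','o','t','f','s','e','n'] from rfl] at hc
    simp only [List.mem_cons, List.not_mem_nil, or_false] at hc
    rcases hc with h|h|h|h|h|h|h|h|h|h|h|h|h|h|h <;> subst h <;>
      simp [pvGoB, pvMatchesA, pvCands, List.isPrefixOf]
  · rw [show "123456789otfsen".toList =
        ['1','2','3','4','5','6','7','8','9','o','t','f','s','e','n'] from rfl] at hc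
    simp only [List.mem_cons, List.not_mem_nil, or_false, not_or] at hc
    obtain ⟨h1,h2,h3,h4,h5,h6,h7,h8,h9,ho,ht,hf,hs,he,hn⟩ := hc
    have b1 : ('1' == c) = false := beq_eq_false_iff_ne.mpr fun h => h1 h.symm
    have b2 : ('2' == c) = false := beq_eq_false_iff_ne.mpr fun h => h2 h.symm
    have b3 : ('3' == c) = false := beq_eq_false_iff_ne.mpr fun h => h3 h.symm
    have b4 : ('4' == c) = false := beq_eq_false_iff_ne.mpr fun h => h4 h.symm
    have b5 : ('5' == c) = false := beq_eq_false_iff_ne.mpr fun h => h5 h.symm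
    have b6 : ('6' == c) = false := beq_eq_false_iff_ne.mpr fun h => h6 h.symm
    have b7 : ('7' == c) = false := beq_eq_false_iff_ne.mpr fun h => h7 h.symm
    have b8 : ('8' == c) = false := beq_eq_false_iff_ne.mpr fun h => h8 h.symm
    have b9 : ('9' == c) = false := beq_eq_false_iff_ne.mpr fun h => h9 h.symm
    have bo : ('o' == c) = false := beq_eq_false_iff_ne.mpr fun h => ho h.symm
    have bt : ('t' == c) = false := beq_eq_false_iff_ne.mpr fun h => ht h.symm
    have bf : ('f' == c) = false := beq_eq_false_iff_ne.mpr fun h => hf h.symm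
    have bs : ('s' == c) = false := beq_eq_false_iff_ne.mpr fun h => hs h.symm
    have be : ('e' == c) = false := beq_eq_false_iff_ne.mpr fun h => he h.symm
    have bn : ('n' == c) = false := beq_eq_false_iff_ne.mpr fun h => hn h.symm
    simp [pvGoB, pvMatchesA, pvCands, List.isPrefixOf,
      b1, b2, b3, b4, b5, b6, b7, b8, b9, bo, bt, bf, bs, be, bn,
      ho, ht, hf, hs, he, hn]
    exact ⟨h1, h2, h3, h4, h5, h6, h7, h8, h9⟩

-- ===== VERDICT (by name: the statement is the Claim_ definition above) =====
theorem calibration_num_spec : Claim_equal_calibration_num := by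
  intro s _
  unfold Spec_calibration_num calibration_num calibration_num_alt
  rcases hl : s.toList with _ | ⟨c, rest⟩
  · rfl
  · exact pvMain_cons c rest
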